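-- pv_equiv track=rewrite | github.com/ZakiYudhistira/Tucil1_13522031 | src/Main.py | compareToken
-- ===== SOURCE A (Python) =====
-- def compareToken(tokens, seq):
--     # Comparing 2 array of tokens and returns a boolean
--     if len(seq) > len(tokens):
--         return False
--     else:
--         for i in range(len(tokens) - len(seq) + 1):
--             if seq[0] == tokens[i]:
--                 flag = True
--                 for j in range(1, len(seq)):
--                     if seq[j] != tokens[i+j]:
--                         flag = False
--                         break
--                 if flag:
--                     return True
--         return False
-- ===== SOURCE B (Python) =====
-- def compareToken(tokens, seq):
--     # Suffix-peeling: chop tokens from the front, testing whether seq is a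
--     # prefix of the current suffix by one whole-slice comparison.
--     t = tokens
--     m = len(seq)
--     while len(t) >= m:
--         if t[:m] == seq:
--             return True
--         t = t[1:]
--     return False
-- ===== Notes on version B (the rewrite author's own statement) =====
-- stated objective: alternative
-- what changed: Replaces A's index arithmetic (outer index loop, first-element probe, inner flag/break loop over offsets) by suffix-peeling: repeatedly test whether seq is a prefix of the current suffix with one slice comparison, then drop the head; no indices at all.
import Mathlib
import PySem

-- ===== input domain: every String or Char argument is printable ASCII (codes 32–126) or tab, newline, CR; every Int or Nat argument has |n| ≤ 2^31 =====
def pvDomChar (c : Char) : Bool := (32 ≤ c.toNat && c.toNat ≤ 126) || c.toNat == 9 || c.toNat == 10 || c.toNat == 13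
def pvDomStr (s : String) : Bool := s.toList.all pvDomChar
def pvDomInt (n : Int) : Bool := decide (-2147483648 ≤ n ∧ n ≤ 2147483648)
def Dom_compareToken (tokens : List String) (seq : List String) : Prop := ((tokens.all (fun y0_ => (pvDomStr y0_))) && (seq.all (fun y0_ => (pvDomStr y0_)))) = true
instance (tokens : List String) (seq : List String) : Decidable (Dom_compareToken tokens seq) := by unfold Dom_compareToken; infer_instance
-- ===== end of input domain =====

-- B replaces A's index-based double loop by suffix-peeling with whole-prefix
-- comparison; same asymptotic cost, no indices (objective: alternative).

-- ===== PORT A =====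
-- `for j in range(1, len(seq)): if seq[j] != tokens[i+j]: flag=False; break` + `if flag`
def aInner (tokens seq : List String) (i : Int) : List Int → Bool
  | [] => true
  | j :: rest =>
    if PySem.List.pyGetD seq j "" != PySem.List.pyGetD tokens (i + j) "" then false
    else aInner tokens seq i rest

-- `for i in range(...): if seq[0] == tokens[i]: … if flag: return True` / `return False`
def aOuter (tokens seq : List String) : List Int → Bool
  | [] => false
  | i :: rest =>
    if PySem.List.pyGetD seq 0 "" == PySem.List.pyGetD tokens i "" then
      if aInner tokens seq i (PySem.List.pyRange 1 (seq.length : Int) 1) then true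
      else aOuter tokens seq rest
    else aOuter tokens seq rest

def compareToken (tokens : List String) (seq : List String) : Bool :=
  if (seq.length : Int) > (tokens.length : Int) then false
  else aOuter tokens seq (PySem.List.pyRange 0 ((tokens.length : Int) - (seq.length : Int) + 1) 1)

-- ===== PORT B =====
-- the while loop of Source B; t[:m] = List.take m t (exact: m = len(seq) ≥ 0), t[1:] = t.tail
def bLoop (seq : List String) : List String → Bool
  | [] => decide (seq.length ≤ 0)   -- the loop's last test: while-condition on t = []
                                    -- (the slice check there is [] == seq, vacuous under it)
  | x :: rest =>
    if seq.length ≤ (x :: rest).length then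
      if (x :: rest).take seq.length == seq then true
      else bLoop seq rest           -- t = t[1:]
    else false

def compareToken_alt (tokens : List String) (seq : List String) : Bool :=
  bLoop seq tokens

-- ===== PRECONDITION & SPEC =====
-- Pre_ excludes only empty seq, on which A raises IndexError (it reads seq[0]).
def Pre_compareToken (tokens : List String) (seq : List String) : Prop := seq ≠ []
instance (tokens : List String) (seq : List String) : Decidable (Pre_compareToken tokens seq) := by unfold Pre_compareToken; infer_instance
def pvWitness_compareToken : List String × List String := (["a", "b"], ["b"])
def Spec_compareToken (tokens : List String) (seq : List String) (out : Bool) : Prop := out = compareToken_alt tokens seq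
instance (tokens : List String) (seq : List String) (out : Bool) : Decidable (Spec_compareToken tokens seq out) := by unfold Spec_compareToken; infer_instance

-- ===== CLAIM (what is proved, stated in full; the proofs are below) =====
def Claim_equal_compareToken : Prop := ∀ (tokens : List String) (seq : List String), Dom_compareToken tokens seq → Pre_compareToken tokens seq → Spec_compareToken tokens seq (compareToken tokens seq)

-- ===== LEMMAS AND PROOFS =====

-- the common spec: seq occurs at (Nat) position k of tokens
def MatchAt (tokens seq : List String) (k : Nat) : Prop :=
  (tokens.drop k).take seq.length = seq

theorem matchAt_len {t seq : List String} {k : Nat} (h : MatchAt t seq k) :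
    seq.length ≤ t.length - k := by
  unfold MatchAt at h
  have h1 := congrArg List.length h
  simp at h1
  exact h1

-- B side: bLoop finds a match at some position
theorem bLoop_iff (seq : List String) (t : List String) :
    bLoop seq t = true ↔ ∃ k, MatchAt t seq k := by
  induction t with
  | nil =>
    simp only [bLoop, decide_eq_true_eq]
    constructor
    · intro h
      exact ⟨0, by unfold MatchAt; simp [List.length_eq_zero_iff.mp (Nat.le_zero.mp h)]⟩
    · rintro ⟨k, hk⟩
      have h2 := matchAt_len hk
      simp at h2
      simp [h2]
  | cons x rest ih =>
    simp only [bLoop, beq_iff_eq]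
    by_cases hg : seq.length ≤ (x :: rest).length
    · rw [if_pos hg]
      by_cases hc : (x :: rest).take seq.length = seq
      · rw [if_pos hc]
        exact iff_of_true rfl ⟨0, by unfold MatchAt; simpa using hc⟩
      · rw [if_neg hc, ih]
        constructor
        · rintro ⟨k, hk⟩
          exact ⟨k + 1, by unfold MatchAt at hk ⊢; simpa using hk⟩
        · rintro ⟨k, hk⟩
          cases k with
          | zero => exact absurd (by unfold MatchAt at hk; simpa using hk) hc
          | succ k' => exact ⟨k', by unfold MatchAt at hk ⊢; simpa using hk⟩
    · rw [if_neg hg]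
      refine iff_of_false (by simp) ?_
      rintro ⟨k, hk⟩
      have h2 := matchAt_len hk
      simp only [List.length_cons] at h2 hg
      omega

-- A side pieces
theorem aInner_iff (tokens seq : List String) (i : Int) (L : List Int) :
    aInner tokens seq i L = true ↔
      ∀ j ∈ L, PySem.List.pyGetD seq j "" = PySem.List.pyGetD tokens (i + j) "" := by
  induction L with
  | nil => simp [aInner]
  | cons j rest ih => by_cases h : PySem.List.pyGetD seq j "" = PySem.List.pyGetD tokens (i + j) "" <;>
      simp [aInner, h, ih]

theorem aOuter_iff (tokens seq : List String) (L : List Int) :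
    aOuter tokens seq L = true ↔
      ∃ i ∈ L, PySem.List.pyGetD seq 0 "" = PySem.List.pyGetD tokens i "" ∧
        aInner tokens seq i (PySem.List.pyRange 1 (seq.length : Int) 1) = true := by
  induction L with
  | nil => simp [aOuter]
  | cons i rest ih =>
    by_cases h : PySem.List.pyGetD seq 0 "" = PySem.List.pyGetD tokens i "" <;>
      by_cases h2 : aInner tokens seq i (PySem.List.pyRange 1 (seq.length : Int) 1) = true <;>
      simp [aOuter, h, h2, ih]

-- the per-position check of A equals MatchAt
theorem check_iff_matchAt (tokens seq : List String) (hs : seq ≠ []) (i : Int)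
    (h0 : 0 ≤ i) (hle : i + (seq.length : Int) ≤ (tokens.length : Int)) :
    (PySem.List.pyGetD seq 0 "" = PySem.List.pyGetD tokens i "" ∧
      aInner tokens seq i (PySem.List.pyRange 1 (seq.length : Int) 1) = true)
    ↔ MatchAt tokens seq i.toNat := by
  have hm : 0 < seq.length := List.length_pos_iff.mpr hs
  have hin : i < (tokens.length : Int) := by omega
  rw [aInner_iff]
  constructor
  · rintro ⟨h0eq, hj⟩
    unfold MatchAt
    apply List.ext_getElem?
    intro jn
    rw [List.getElem?_take, List.getElem?_drop]
    by_cases hjn : jn < seq.length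
    · rw [if_pos hjn]
      have hbound : i.toNat + jn < tokens.length := by omega
      rw [List.getElem?_eq_getElem hbound, List.getElem?_eq_getElem hjn]
      congr 1
      cases jn with
      | zero =>
        have h0' := h0eq
        rw [PySem.List.pyGetD_eq_getElem seq "" (by omega) (by exact_mod_cast hm),
            PySem.List.pyGetD_eq_getElem tokens "" h0 hin] at h0'
        simpa using h0'.symm
      | succ j' =>
        have hmem : ((j' + 1 : Nat) : Int) ∈ PySem.List.pyRange 1 (seq.length : Int) 1 := by
          rw [PySem.List.mem_pyRange_one]
          exact ⟨by omega, by omega⟩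
        have hthis := hj _ hmem
        rw [PySem.List.pyGetD_eq_getElem seq "" (by omega) (by exact_mod_cast hjn),
            PySem.List.pyGetD_eq_getElem tokens "" (by omega) (by omega)] at hthis
        have hidx : (i + ((j' : Int) + 1)).toNat = i.toNat + (j' + 1) := by omega
        simpa [Int.toNat_natCast, hidx] using hthis.symm
    · rw [if_neg hjn]
      exact (List.getElem?_eq_none (by omega)).symm
  · intro hM
    have hpt : ∀ jn, jn < seq.length → tokens[i.toNat + jn]? = seq[jn]? := by
      intro jn hjn
      unfold MatchAt at hM
      conv_rhs => rw [← hM]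
      rw [List.getElem?_take, List.getElem?_drop, if_pos hjn]
    refine ⟨?_, ?_⟩
    · rw [PySem.List.pyGetD_eq_getElem seq "" (by omega) (by exact_mod_cast hm),
          PySem.List.pyGetD_eq_getElem tokens "" h0 hin]
      have hthis := hpt 0 hm
      rw [List.getElem?_eq_getElem (by omega), List.getElem?_eq_getElem hm] at hthis
      simpa using hthis.symm
    · intro j hjmem
      rw [PySem.List.mem_pyRange_one] at hjmem
      obtain ⟨hj1, hj2⟩ := hjmem
      rw [PySem.List.pyGetD_eq_getElem seq "" (by omega) hj2,
          PySem.List.pyGetD_eq_getElem tokens "" (by omega) (by omega)]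
      have hjlt : j.toNat < seq.length := by omega
      have hthis := hpt j.toNat hjlt
      rw [List.getElem?_eq_getElem (by omega), List.getElem?_eq_getElem hjlt] at hthis
      have hidx : (i + j).toNat = i.toNat + j.toNat := by omega
      simpa [hidx] using hthis.symm

theorem compareToken_eq (tokens seq : List String) (hs : seq ≠ []) :
    compareToken tokens seq = compareToken_alt tokens seq := by
  have hm : 0 < seq.length := List.length_pos_iff.mpr hs
  rw [Bool.eq_iff_iff]
  unfold compareToken compareToken_alt
  rw [bLoop_iff]
  by_cases hg : (seq.length : Int) > (tokens.length : Int)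
  · rw [if_pos hg]
    simp only [Bool.false_eq_true, false_iff]
    rintro ⟨k, hk⟩
    have := matchAt_len hk
    omega
  · rw [if_neg hg]
    rw [aOuter_iff]
    constructor
    · rintro ⟨i, hmem, hchk⟩
      rw [PySem.List.mem_pyRange_one] at hmem
      obtain ⟨hi0, hi1⟩ := hmem
      exact ⟨i.toNat, (check_iff_matchAt tokens seq hs i hi0 (by omega)).mp hchk⟩
    · rintro ⟨k, hk⟩
      have hlen := matchAt_len hk
      refine ⟨(k : Int), ?_, ?_⟩
      · rw [PySem.List.mem_pyRange_one]
        exact ⟨Int.natCast_nonneg k, by omega⟩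
      · apply (check_iff_matchAt tokens seq hs (k : Int) (Int.natCast_nonneg k) (by omega)).mpr
        simpa using hk

-- ===== VERDICT (by name: the statement is the Claim_ definition above) =====
theorem compareToken_spec : Claim_equal_compareToken := by
  intro tokens seq _ hpre
  unfold Spec_compareToken
  exact compareToken_eq tokens seq hpre
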